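-- pv_equiv track=rewrite | github.com/spanichella/spanichella.github.io | img/collaboration_map/collaboration-graph.py | generate_name_surname_list
-- ===== SOURCE A (Python) =====
-- def generate_name_surname_list(coauthors):
--     name_surname_list = []
--     for coauthor in coauthors:
--         name_parts = coauthor.strip().split(" ")
--         if len(name_parts) > 1:
--             # If the name contains more than one part, assume the last part is the surname
--             first_name = " ".join(name_parts[:-1])
--             surname = name_parts[-1]
--             name_surname_list.append(f"{first_name} {surname}")
--         else:
--             # In case the name only contains a single part, treat it as first name or surname
--             name_surname_list.append(f"{name_parts[0]}")
--     return name_surname_list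
-- ===== SOURCE B (Python) =====
-- def generate_name_surname_list(coauthors):
--     # split(" ") rejoined with " " is the identity on the stripped string,
--     # so both branches of A reduce to coauthor.strip().
--     return [coauthor.strip() for coauthor in coauthors]
-- ===== Notes on version B (the rewrite author's own statement) =====
-- stated objective: simpler
-- what changed: Drops the split-into-parts / length branch / rejoin machinery entirely: since ' '.join(s.split(' ')) == s, each element is just coauthor.strip(), so B is a one-line strip comprehension.
import Mathlib
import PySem

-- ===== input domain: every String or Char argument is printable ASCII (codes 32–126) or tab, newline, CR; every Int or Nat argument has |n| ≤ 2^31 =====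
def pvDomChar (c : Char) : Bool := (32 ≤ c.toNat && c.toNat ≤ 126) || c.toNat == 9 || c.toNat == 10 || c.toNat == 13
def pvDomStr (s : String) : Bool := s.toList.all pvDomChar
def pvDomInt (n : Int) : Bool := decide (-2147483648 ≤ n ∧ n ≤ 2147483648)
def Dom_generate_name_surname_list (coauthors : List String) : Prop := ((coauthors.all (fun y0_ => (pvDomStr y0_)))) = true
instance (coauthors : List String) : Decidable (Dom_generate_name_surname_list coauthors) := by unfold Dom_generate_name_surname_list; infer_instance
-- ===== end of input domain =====

-- B replaces A's split-into-parts / length branch / rejoin by a plain per-element strip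
-- (objective: simpler), since " ".join(s.split(" ")) is the identity on the stripped string.

-- ===== PORT A =====
-- literal transliteration of A; the f-string "{first} {surname}" is the char-list
-- append first ++ " " ++ surname; the [-1]/[0] indexes are always in range (the split
-- result is nonempty, and has length > 1 in the first branch), so .getD [] is never taken
def generate_name_surname_list (coauthors : List String) : List String :=
  coauthors.foldl (fun name_surname_list coauthor =>
      let name_parts := PySem.Chars.splitOn (PySem.Chars.strip coauthor.toList) [' ']
      if name_parts.length > 1 then
        let first_name := PySem.Chars.join [' '] (PySem.List.slice name_parts none (some (-1)))
        let surname := (PySem.List.pyGet? name_parts (-1)).getD []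
        name_surname_list ++ [String.ofList (first_name ++ [' '] ++ surname)]
      else
        name_surname_list ++ [String.ofList ((PySem.List.pyGet? name_parts 0).getD [])])
    []

-- ===== PORT B =====
def generate_name_surname_list_alt (coauthors : List String) : List String :=
  coauthors.map PySem.Str.strip

-- ===== PRECONDITION & SPEC =====
def Spec_generate_name_surname_list (coauthors : List String) (out : List String) : Prop := out = generate_name_surname_list_alt coauthors
instance (coauthors : List String) (out : List String) : Decidable (Spec_generate_name_surname_list coauthors out) := by unfold Spec_generate_name_surname_list; infer_instance

-- ===== CLAIM (what is proved, stated in full; the proofs are below) =====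
def Claim_equal_generate_name_surname_list : Prop := ∀ (coauthors : List String), Dom_generate_name_surname_list coauthors → Spec_generate_name_surname_list coauthors (generate_name_surname_list coauthors)

-- ===== LEMMAS AND PROOFS =====

theorem inter_cons {sep x : List Char} (ys : List (List Char)) (h : ys ≠ []) :
    List.intercalate sep (x :: ys) = x ++ sep ++ List.intercalate sep ys := by
  cases ys with
  | nil => exact absurd rfl h
  | cons a t => simp [List.intercalate, List.intersperse]

theorem inter_snoc (sep b : List Char) : ∀ (xs : List (List Char)), xs ≠ [] →
    List.intercalate sep (xs ++ [b]) = List.intercalate sep xs ++ sep ++ b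
  | [], h => absurd rfl h
  | [a], _ => by simp [List.intercalate, List.intersperse]
  | a :: c :: xs, _ => by
    rw [List.cons_append, inter_cons ((c :: xs) ++ [b]) (by simp),
      inter_cons (c :: xs) (by simp), inter_snoc sep b (c :: xs) (by simp)]
    simp

theorem inter_mid (sep a b : List Char) : ∀ (xs : List (List Char)),
    List.intercalate sep (xs ++ [a, b]) = List.intercalate sep (xs ++ [a ++ sep ++ b])
  | [] => by simp [List.intercalate, List.intersperse]
  | x :: xs => by
    rw [List.cons_append, List.cons_append,
      inter_cons (xs ++ [a, b]) (by simp), inter_cons (xs ++ [a ++ sep ++ b]) (by simp),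
      inter_mid sep a b xs]

theorem go_inter (sep : List Char) (hsep : sep ≠ []) : ∀ (fuel : Nat) (l cur : List Char)
    (acc : List (List Char)), l.length < fuel →
    List.intercalate sep (PySem.Chars.splitOn.go sep fuel l cur acc) =
    List.intercalate sep (acc.reverse ++ [cur.reverse ++ l])
  | 0, l, cur, acc, h => by omega
  | fuel + 1, [], cur, acc, _ => by
    rw [PySem.Chars.splitOn.go]
    all_goals simp
  | fuel + 1, c :: rest, cur, acc, h => by
    rw [PySem.Chars.splitOn.go]
    by_cases hp : sep.isPrefixOf (c :: rest) = true
    · have hpre : sep <+: (c :: rest) := List.isPrefixOf_iff_prefix.mp hp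
      have hlen : sep.length ≤ (c :: rest).length := hpre.length_le
      have hs1 : 1 ≤ sep.length := List.length_pos_iff.mpr hsep
      rw [if_pos hp, go_inter sep hsep fuel _ [] _
        (by simp only [List.length_drop]; simp at h hlen ⊢; omega)]
      have hl : (c :: rest) = sep ++ (c :: rest).drop sep.length := by
        obtain ⟨t, ht⟩ := hpre
        rw [← ht, List.drop_left]
      calc List.intercalate sep ((cur.reverse :: acc).reverse ++ [List.nil.reverse ++ (c :: rest).drop sep.length])
          = List.intercalate sep (acc.reverse ++ [cur.reverse, (c :: rest).drop sep.length]) := by simp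
        _ = List.intercalate sep (acc.reverse ++ [cur.reverse ++ sep ++ (c :: rest).drop sep.length]) := inter_mid ..
        _ = List.intercalate sep (acc.reverse ++ [cur.reverse ++ (c :: rest)]) := by
              rw [List.append_assoc cur.reverse, ← hl]
    · rw [if_neg hp, go_inter sep hsep fuel rest (c :: cur) acc (by simp at h ⊢; omega)]
      simp

theorem go_ne_nil (sep : List Char) : ∀ (fuel : Nat) (l cur : List Char)
    (acc : List (List Char)), PySem.Chars.splitOn.go sep fuel l cur acc ≠ []
  | 0, l, cur, acc => by rw [PySem.Chars.splitOn.go]; all_goals simp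
  | fuel + 1, [], cur, acc => by
    rw [PySem.Chars.splitOn.go]
    all_goals simp
  | fuel + 1, c :: rest, cur, acc => by
    rw [PySem.Chars.splitOn.go]
    by_cases hp : sep.isPrefixOf (c :: rest) = true
    · rw [if_pos hp]; exact go_ne_nil sep fuel _ _ _
    · rw [if_neg hp]; exact go_ne_nil sep fuel _ _ _

theorem splitOn_inter (s sep : List Char) (hsep : sep ≠ []) :
    List.intercalate sep (PySem.Chars.splitOn s sep) = s := by
  unfold PySem.Chars.splitOn
  rw [go_inter sep hsep (s.length + 1) s [] [] (by omega)]
  simp [List.intercalate]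

theorem splitOn_ne_nil (s sep : List Char) : PySem.Chars.splitOn s sep ≠ [] :=
  go_ne_nil sep (s.length + 1) s [] []

theorem slice_neg_one {α : Type} (l : List α) :
    PySem.List.slice l none (some (-1)) = l.dropLast := by
  simp [PySem.List.slice, List.dropLast_eq_take]

theorem pyGet?_neg_one {α : Type} (l : List α) (h : l ≠ []) :
    PySem.List.pyGet? l (-1) = some (l.getLast h) := by
  have hl : 1 ≤ l.length := List.length_pos_iff.mpr h
  simp [PySem.List.pyGet?, PySem.List.pyIdx?, hl, List.getLast_eq_getElem,
    List.getElem?_eq_getElem (by omega : l.length - 1 < l.length)]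

-- the per-element fact: A's branch-and-rejoin reproduces the stripped input
theorem rejoin_eq (t : List Char) :
    (let name_parts := PySem.Chars.splitOn t [' ']
     if name_parts.length > 1 then
       PySem.Chars.join [' '] (PySem.List.slice name_parts none (some (-1))) ++ [' '] ++
         (PySem.List.pyGet? name_parts (-1)).getD []
     else (PySem.List.pyGet? name_parts 0).getD []) = t := by
  set parts := PySem.Chars.splitOn t [' '] with hparts
  have hne : parts ≠ [] := splitOn_ne_nil t [' ']
  have hI : List.intercalate [' '] parts = t := splitOn_inter t [' '] (by simp)
  by_cases hlen : parts.length > 1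
  · rw [if_pos hlen, slice_neg_one, pyGet?_neg_one parts hne]
    have hdl : parts.dropLast ≠ [] := by
      have h2 : parts.dropLast.length = parts.length - 1 := List.length_dropLast
      intro h
      rw [h] at h2
      simp at h2; omega
    have : PySem.Chars.join [' '] parts.dropLast ++ [' '] ++ parts.getLast hne
        = List.intercalate [' '] (parts.dropLast ++ [parts.getLast hne]) :=
      (inter_snoc [' '] (parts.getLast hne) parts.dropLast hdl).symm
    rw [Option.getD_some, PySem.Chars.join] at *
    rw [this, List.dropLast_append_getLast hne, hI]
  · rw [if_neg hlen]
    have h1 : parts.length = 1 := by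
      have := List.length_pos_iff.mpr hne
      omega
    obtain ⟨p, hp⟩ := List.length_eq_one_iff.mp h1
    rw [hp] at hI ⊢
    simp [PySem.List.pyGet?, PySem.List.pyIdx?]
    simpa [List.intercalate, List.intersperse] using hI

-- ===== VERDICT (by name: the statement is the Claim_ definition above) =====
theorem generate_name_surname_list_spec : Claim_equal_generate_name_surname_list := by
  intro coauthors _
  unfold Spec_generate_name_surname_list generate_name_surname_list generate_name_surname_list_alt
  have hbody : ∀ (acc : List String) (coauthor : String),
      (let name_parts := PySem.Chars.splitOn (PySem.Chars.strip coauthor.toList) [' ']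
       if name_parts.length > 1 then
         let first_name := PySem.Chars.join [' '] (PySem.List.slice name_parts none (some (-1)))
         let surname := (PySem.List.pyGet? name_parts (-1)).getD []
         acc ++ [String.ofList (first_name ++ [' '] ++ surname)]
       else
         acc ++ [String.ofList ((PySem.List.pyGet? name_parts 0).getD [])]) =
      acc ++ [PySem.Str.strip coauthor] := by
    intro acc coauthor
    have h := rejoin_eq (PySem.Chars.strip coauthor.toList)
    simp only at h ⊢
    split_ifs with hl
    · rw [if_pos hl] at h
      rw [h, PySem.Str.strip]
    · rw [if_neg hl] at h
      rw [h, PySem.Str.strip]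
  calc List.foldl (fun name_surname_list coauthor =>
        let name_parts := PySem.Chars.splitOn (PySem.Chars.strip coauthor.toList) [' ']
        if name_parts.length > 1 then
          let first_name := PySem.Chars.join [' '] (PySem.List.slice name_parts none (some (-1)))
          let surname := (PySem.List.pyGet? name_parts (-1)).getD []
          name_surname_list ++ [String.ofList (first_name ++ [' '] ++ surname)]
        else
          name_surname_list ++ [String.ofList ((PySem.List.pyGet? name_parts 0).getD [])]) [] coauthors
      = List.foldl (fun acc coauthor => acc ++ [PySem.Str.strip coauthor]) [] coauthors := by
        congr 1; funext acc coauthor; exact hbody acc coauthor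
    _ = [] ++ coauthors.map PySem.Str.strip := PySem.List.foldl_append_singleton_eq_map ..
    _ = coauthors.map PySem.Str.strip := by simp
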